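-- pv_equiv track=rewrite | github.com/Rohith-367/VideoGen-text-to-video | utility/video/video_search_query_generator.py | merge_empty_intervals
-- ===== SOURCE A (Python) =====
-- def merge_empty_intervals(segments):
--     if not segments:
--         return []
--
--     merged = []
--     i = 0
--     while i < len(segments):
--         interval, url = segments[i]
--         if url is None:
--             # Find consecutive None intervals
--             j = i + 1
--             while j < len(segments) and segments[j][1] is None:
--                 j += 1
--
--             # Merge consecutive None intervals with the previous valid URL
--             if i > 0:
--                 prev_interval, prev_url = merged[-1]
--                 if prev_url is not None and prev_interval[1] == interval[0]:
--                     merged[-1] = [[prev_interval[0], segments[j-1][0][1]], prev_url]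
--                 else:
--                     merged.append([interval, prev_url])
--             else:
--                 merged.append([interval, None])
--
--             i = j
--         else:
--             merged.append([interval, url])
--             i += 1
--
--     return merged
-- ===== SOURCE B (Python) =====
-- def merge_empty_intervals(segments):
--     # Single flat pass: a None-run being merged is tracked via `pending`
--     # (the run's last interval so far) and patched into merged[-1] when the
--     # run ends, instead of A's nested while-scan ahead.
--     merged = []
--     in_none = False
--     pending = None  # last interval of a None-run that merges into merged[-1]
--     for interval, url in segments:
--         if url is not None:
--             if pending is not None:
--                 pi, pu = merged[-1]
--                 merged[-1] = [[pi[0], pending[1]], pu]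
--                 pending = None
--             merged.append([interval, url])
--             in_none = False
--         elif in_none:
--             if pending is not None:
--                 pending = interval
--         else:
--             in_none = True
--             if not merged:
--                 merged.append([interval, None])
--             else:
--                 prev_interval, prev_url = merged[-1]
--                 if prev_url is not None and prev_interval[1] == interval[0]:
--                     pending = interval
--                 else:
--                     merged.append([interval, prev_url])
--     if pending is not None:
--         pi, pu = merged[-1]
--         merged[-1] = [[pi[0], pending[1]], pu]
--     return merged
-- ===== Notes on version B (the rewrite author's own statement) =====
-- stated objective: alternative
-- what changed: A scans ahead with a nested while over each consecutive None-run and rewrites merged[-1] once per run; B is a single flat pass keeping in_none/pending state across iterations and patches the pending run-end interval into merged[-1] only when the run closes (or after the loop).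
import Mathlib
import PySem

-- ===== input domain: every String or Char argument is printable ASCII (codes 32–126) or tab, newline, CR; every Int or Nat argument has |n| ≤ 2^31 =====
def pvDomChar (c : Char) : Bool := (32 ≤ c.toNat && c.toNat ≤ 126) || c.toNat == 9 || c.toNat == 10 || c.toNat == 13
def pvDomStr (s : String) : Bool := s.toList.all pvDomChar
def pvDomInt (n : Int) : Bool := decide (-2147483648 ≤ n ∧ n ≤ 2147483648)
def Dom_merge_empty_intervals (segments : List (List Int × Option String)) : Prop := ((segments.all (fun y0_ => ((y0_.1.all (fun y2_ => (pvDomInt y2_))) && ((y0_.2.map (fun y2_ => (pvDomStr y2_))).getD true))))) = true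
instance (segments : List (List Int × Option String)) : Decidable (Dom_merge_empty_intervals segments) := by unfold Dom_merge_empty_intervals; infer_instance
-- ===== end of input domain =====

-- B replaces A's nested while-scan over each None-run by one flat pass with a
-- `pending` interval patched into merged[-1] when the run ends (objective: alternative decomposition).
-- List indexing that would raise IndexError in Python is modelled by getD with
-- default 0; such inputs are exactly the ones excluded by Pre_ below.

-- ===== PORT A =====
-- outer while-loop of A; `merged` is the accumulator, `rest` the suffix from index i;
-- the inner `while j < len and segments[j][1] is None` is the takeWhile/dropWhile split
def goA_merge (merged : List (List Int × Option String)) :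
    List (List Int × Option String) → List (List Int × Option String)
  | [] => merged
  | (interval, url) :: rest₁ =>
    match url with
    | some u => goA_merge (merged ++ [(interval, some u)]) rest₁
    | none =>
      -- find consecutive None intervals
      let run := rest₁.takeWhile (fun s => s.2.isNone)
      let rest₂ := rest₁.dropWhile (fun s => s.2.isNone)
      -- segments[j-1][0] : interval of the last segment of the run
      let lastI := (run.getLastD (interval, none)).1
      -- i > 0  ⟺  merged ≠ []  (every earlier iteration appended)
      match merged.getLast? with
      | none => goA_merge (merged ++ [(interval, none)]) rest₂
      | some (prevI, prevU) =>
        if prevU.isSome ∧ prevI.getD 1 0 = interval.getD 0 0 then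
          goA_merge (merged.dropLast ++ [([prevI.getD 0 0, lastI.getD 1 0], prevU)]) rest₂
        else
          goA_merge (merged ++ [(interval, prevU)]) rest₂
  termination_by rest => rest.length
  decreasing_by
  · simp
  · have := List.length_dropWhile_le (fun s : List Int × Option String => s.2.isNone) rest₁
    simp; omega
  · have := List.length_dropWhile_le (fun s : List Int × Option String => s.2.isNone) rest₁
    simp; omega
  · have := List.length_dropWhile_le (fun s : List Int × Option String => s.2.isNone) rest₁
    simp; omega

def merge_empty_intervals (segments : List (List Int × Option String)) :
    List (List Int × Option String) :=
  if segments.isEmpty then [] else goA_merge [] segments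

-- ===== PORT B =====
-- merged[-1] = [[pi[0], pending[1]], pu]
def patchB_merge (merged : List (List Int × Option String)) (p : List Int) :
    List (List Int × Option String) :=
  match merged.getLast? with
  | some (pi, pu) => merged.dropLast ++ [([pi.getD 0 0, p.getD 1 0], pu)]
  | none => merged  -- unreachable: B only sets `pending` when merged is nonempty

-- state = (merged, in_none, pending); one loop-body step of Source B
def stepB_merge (st : List (List Int × Option String) × Bool × Option (List Int))
    (seg : List Int × Option String) :
    List (List Int × Option String) × Bool × Option (List Int) :=
  let (merged, inNone, pending) := st
  let (interval, url) := seg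
  match url with
  | some u =>
    let m := match pending with
      | some p => patchB_merge merged p
      | none => merged
    (m ++ [(interval, some u)], false, none)
  | none =>
    if inNone then
      match pending with
      | some _ => (merged, inNone, some interval)
      | none => (merged, inNone, none)
    else
      match merged.getLast? with
      | none => (merged ++ [(interval, none)], true, none)
      | some (prevI, prevU) =>
        if prevU.isSome ∧ prevI.getD 1 0 = interval.getD 0 0 then
          (merged, true, some interval)
        else
          (merged ++ [(interval, prevU)], true, none)

def merge_empty_intervals_alt (segments : List (List Int × Option String)) :
    List (List Int × Option String) :=
  let st := segments.foldl stepB_merge ([], false, none)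
  match st.2.2 with
  | some p => patchB_merge st.1 p
  | none => st.1

-- ===== PRECONDITION & SPEC =====
def pvSegAt (s : List (List Int × Option String)) (i : Nat) : List Int × Option String :=
  s.getD i ([], none)

-- Pre_ excludes exactly the inputs on which Python A raises IndexError: a None-run
-- starting at i>0 whose preceding interval has length < 2, whose first interval is
-- empty, or (when the merge condition holds) whose last interval has length < 2.
def Pre_merge_empty_intervals (segments : List (List Int × Option String)) : Prop :=
  ∀ i ∈ List.range segments.length,
    0 < i → (pvSegAt segments i).2 = none → (pvSegAt segments (i-1)).2 ≠ none →
      2 ≤ (pvSegAt segments (i-1)).1.length ∧ 1 ≤ (pvSegAt segments i).1.length ∧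
      ((pvSegAt segments (i-1)).1.getD 1 0 = (pvSegAt segments i).1.getD 0 0 →
        ∀ k ∈ List.range segments.length, i ≤ k →
          (∀ m ∈ List.range (k+1), i ≤ m → (pvSegAt segments m).2 = none) →
          (k + 1 = segments.length ∨ (pvSegAt segments (k+1)).2 ≠ none) →
          2 ≤ (pvSegAt segments k).1.length)

instance (segments : List (List Int × Option String)) :
    Decidable (Pre_merge_empty_intervals segments) := by
  unfold Pre_merge_empty_intervals; infer_instance

def pvWitness_merge_empty_intervals : (List (List Int × Option String)) :=
  [([0, 1], some "u"), ([1, 2], none)]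

def Spec_merge_empty_intervals (segments : List (List Int × Option String))
    (out : List (List Int × Option String)) : Prop :=
  out = merge_empty_intervals_alt segments

instance (segments : List (List Int × Option String)) (out : List (List Int × Option String)) :
    Decidable (Spec_merge_empty_intervals segments out) := by
  unfold Spec_merge_empty_intervals; infer_instance

-- ===== CLAIM (what is proved, stated in full; the proofs are below) =====
def Claim_equal_merge_empty_intervals : Prop :=
  ∀ (segments : List (List Int × Option String)), Dom_merge_empty_intervals segments →
    Pre_merge_empty_intervals segments →
    Spec_merge_empty_intervals segments (merge_empty_intervals segments)

-- ===== LEMMAS AND PROOFS =====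

-- finishing step of B (the `if pending is not None` after the loop)
def finB_merge (st : List (List Int × Option String) × Bool × Option (List Int)) :
    List (List Int × Option String) :=
  match st.2.2 with
  | some p => patchB_merge st.1 p
  | none => st.1

lemma foldl_stepB_none_run (run : List (List Int × Option String))
    (h : ∀ s ∈ run, s.2 = none) (M : List (List Int × Option String)) :
    run.foldl stepB_merge (M, true, none) = (M, true, none) := by
  induction run with
  | nil => rfl
  | cons x xs ih =>
    have hx : x.2 = none := h x (by simp)
    obtain ⟨xi, xu⟩ := x
    simp at hx; subst hx
    have hstep : stepB_merge (M, true, none) (xi, none) = (M, true, none) := by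
      simp [stepB_merge]
    rw [List.foldl_cons, hstep, ih (fun s hs => h s (by simp [hs]))]

lemma foldl_stepB_some_run (run : List (List Int × Option String))
    (h : ∀ s ∈ run, s.2 = none) (M : List (List Int × Option String)) (p : List Int) :
    run.foldl stepB_merge (M, true, some p)
      = (M, true, some ((run.map Prod.fst).getLastD p)) := by
  induction run generalizing p with
  | nil => rfl
  | cons x xs ih =>
    have hx : x.2 = none := h x (by simp)
    obtain ⟨xi, xu⟩ := x
    simp at hx; subst hx
    have hstep : stepB_merge (M, true, some p) (xi, none) = (M, true, some xi) := by
      simp [stepB_merge]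
    rw [List.foldl_cons, hstep, ih (fun s hs => h s (by simp [hs])) xi,
      List.map_cons, List.getLastD_cons]

lemma head_dropWhile_not {α : Type} (f : α → Bool) (l : List α) (s : α)
    (h : (l.dropWhile f).head? = some s) : f s = false := by
  induction l with
  | nil => simp [List.dropWhile] at h
  | cons x xs ih =>
    by_cases hf : f x
    · exact ih (by simpa [List.dropWhile, hf] using h)
    · simp [List.dropWhile, hf] at h
      simpa [← h] using hf

lemma map_fst_getLastD (run : List (List Int × Option String)) (p : List Int)
    (d : List Int × Option String) (hd : d.1 = p) :
    (run.map Prod.fst).getLastD p = (run.getLastD d).1 := by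
  induction run generalizing d p with
  | nil => simpa [List.getLastD] using hd.symm
  | cons x xs ih =>
    rw [List.map_cons, List.getLastD_cons, List.getLastD_cons, ih x.1 x rfl]

lemma foldl_defer_patch (rest : List (List Int × Option String))
    (h : ∀ s, rest.head? = some s → s.2 ≠ none)
    (M : List (List Int × Option String)) (p : List Int) :
    finB_merge (rest.foldl stepB_merge (M, true, some p))
      = finB_merge (rest.foldl stepB_merge (patchB_merge M p, true, none)) := by
  cases rest with
  | nil => rfl
  | cons x xs =>
    obtain ⟨xi, xu⟩ := x
    cases xu with
    | none => exact absurd rfl (h (xi, none) rfl)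
    | some v => simp [stepB_merge]

-- main invariant: A's loop from state (merged, rest) equals B's fold, provided
-- in_none=true only arrives at a suffix that does not start with a None segment
lemma goA_eq_foldl (n : Nat) :
    ∀ rest : List (List Int × Option String), rest.length ≤ n →
    ∀ (merged : List (List Int × Option String)) (b : Bool),
      (b = true → ∀ s, rest.head? = some s → s.2 ≠ none) →
      goA_merge merged rest = finB_merge (rest.foldl stepB_merge (merged, b, none)) := by
  induction n with
  | zero =>
    intro rest hlen merged b _
    have : rest = [] := List.length_eq_zero_iff.mp (Nat.le_zero.mp hlen)
    subst this
    simp [goA_merge, finB_merge]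
  | succ n ih =>
    intro rest hlen merged b hb
    cases rest with
    | nil => simp [goA_merge, finB_merge]
    | cons x rest₁ =>
      obtain ⟨interval, url⟩ := x
      cases url with
      | some u =>
        rw [goA_merge]
        have hs : stepB_merge (merged, b, none) (interval, some u)
            = (merged ++ [(interval, some u)], false, none) := by
          simp [stepB_merge]
        rw [List.foldl_cons, hs]
        exact ih rest₁ (by simpa using hlen) _ false (by simp)
      | none =>
        have hb' : b = false := by
          cases b with
          | false => rfl
          | true => exact absurd rfl (hb rfl (interval, none) rfl)
        subst hb'
        rw [goA_merge]
        set f : List Int × Option String → Bool := fun s => s.2.isNone with hf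
        have hsplit : rest₁ = rest₁.takeWhile f ++ rest₁.dropWhile f :=
          (List.takeWhile_append_dropWhile).symm
        have hrun : ∀ s ∈ rest₁.takeWhile f, s.2 = none := by
          intro s hs
          have := List.mem_takeWhile_imp hs
          simpa [hf, Option.isNone_iff_eq_none] using this
        have hlen₂ : (rest₁.dropWhile f).length ≤ n := by
          have := List.length_dropWhile_le f rest₁
          simp at hlen; omega
        have hhead : ∀ s, (rest₁.dropWhile f).head? = some s → s.2 ≠ none := by
          intro s hs heq
          have := head_dropWhile_not f rest₁ s hs
          simp [hf, heq] at this
        cases hML : merged.getLast? with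
        | none =>
          have hs : stepB_merge (merged, false, none) (interval, none)
              = (merged ++ [(interval, none)], true, none) := by
            simp [stepB_merge, hML]
          rw [List.foldl_cons, hs]
          conv_rhs => rw [hsplit]
          rw [List.foldl_append, foldl_stepB_none_run _ hrun]
          exact ih _ hlen₂ _ true (fun _ => hhead)
        | some pr =>
          obtain ⟨prevI, prevU⟩ := pr
          by_cases hc : prevU.isSome ∧ prevI.getD 1 0 = interval.getD 0 0
          · obtain ⟨hc1, hc2⟩ := hc
            have hc2' : prevI[1]?.getD 0 = interval[0]?.getD 0 := by
              simpa [List.getD] using hc2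
            simp only [if_pos (⟨hc1, hc2⟩ : prevU.isSome ∧ prevI.getD 1 0 = interval.getD 0 0)]
            have hs : stepB_merge (merged, false, none) (interval, none)
                = (merged, true, some interval) := by
              simp [stepB_merge, hML, hc1, hc2']
            rw [List.foldl_cons, hs]
            conv_rhs => rw [hsplit]
            rw [List.foldl_append, foldl_stepB_some_run _ hrun, foldl_defer_patch _ hhead]
            have hpatch : patchB_merge merged
                (((rest₁.takeWhile f).map Prod.fst).getLastD interval)
                = merged.dropLast ++
                  [([prevI.getD 0 0,
                     (((rest₁.takeWhile f).getLastD (interval, none)).1).getD 1 0], prevU)] := by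
              rw [map_fst_getLastD _ interval (interval, none) rfl]
              simp [patchB_merge, hML]
            rw [hpatch]
            exact ih _ hlen₂ _ true (fun _ => hhead)
          · simp only [if_neg hc]
            have hc' : prevU.isSome = true → ¬ prevI[1]?.getD 0 = interval[0]?.getD 0 := by
              intro h1 h2
              exact hc ⟨h1, by simpa [List.getD] using h2⟩
            have hs : stepB_merge (merged, false, none) (interval, none)
                = (merged ++ [(interval, prevU)], true, none) := by
              simp [stepB_merge, hML]
              exact hc'
            rw [List.foldl_cons, hs]
            conv_rhs => rw [hsplit]
            rw [List.foldl_append, foldl_stepB_none_run _ hrun]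
            exact ih _ hlen₂ _ true (fun _ => hhead)

lemma ports_agree (segments : List (List Int × Option String)) :
    merge_empty_intervals segments = merge_empty_intervals_alt segments := by
  cases segments with
  | nil => rfl
  | cons x xs =>
    have h := goA_eq_foldl (x :: xs).length (x :: xs) le_rfl [] false (by simp)
    simpa [merge_empty_intervals, merge_empty_intervals_alt, finB_merge] using h

-- ===== VERDICT (by name: the statement is the Claim_ definition above) =====
theorem merge_empty_intervals_spec : Claim_equal_merge_empty_intervals := by
  intro segments _ _
  unfold Spec_merge_empty_intervals
  exact ports_agree segments
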